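-- pv_equiv track=rewrite | github.com/cokhoa21/Graduate-Research-2 | Cookie Pattern/cookie_statistics.py | analyze_label_distribution
-- ===== SOURCE A (Python) =====
-- def analyze_label_distribution(labels):
--     """
--     Phân tích phân phối của các label
--
--     Args:
--         labels (list): Danh sách các label
--
--     Returns:
--         dict: Thống kê về phân phối label
--     """
--     label_stats = {}
--     for label in labels:
--         if label not in label_stats:
--             label_stats[label] = 0
--         label_stats[label] += 1
--
--     # Sắp xếp theo số lượng giảm dần
--     sorted_stats = dict(sorted(label_stats.items(), key=lambda x: x[1], reverse=True))
--     return sorted_stats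
-- ===== SOURCE B (Python) =====
-- def analyze_label_distribution(labels):
--     counts = {}
--     for label in labels:
--         counts[label] = counts.get(label, 0) + 1
--     if not counts:
--         return {}
--     max_count = max(counts.values())
--     # bucket labels by their count, in first-seen order
--     buckets = {}
--     for label, c in counts.items():
--         buckets.setdefault(c, []).append(label)
--     result = {}
--     for c in range(max_count, 0, -1):
--         for label in buckets.get(c, []):
--             result[label] = c
--     return result
-- ===== Notes on version B (the rewrite author's own statement) =====
-- stated objective: alternative
-- what changed: A sorts the count-dict items with a comparison sort (sorted, key=count, reverse=True); B does a counting/bucket sort: it groups labels into buckets keyed by their count and emits the buckets from the highest count down, preserving first-seen order within a bucket.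
import Mathlib
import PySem

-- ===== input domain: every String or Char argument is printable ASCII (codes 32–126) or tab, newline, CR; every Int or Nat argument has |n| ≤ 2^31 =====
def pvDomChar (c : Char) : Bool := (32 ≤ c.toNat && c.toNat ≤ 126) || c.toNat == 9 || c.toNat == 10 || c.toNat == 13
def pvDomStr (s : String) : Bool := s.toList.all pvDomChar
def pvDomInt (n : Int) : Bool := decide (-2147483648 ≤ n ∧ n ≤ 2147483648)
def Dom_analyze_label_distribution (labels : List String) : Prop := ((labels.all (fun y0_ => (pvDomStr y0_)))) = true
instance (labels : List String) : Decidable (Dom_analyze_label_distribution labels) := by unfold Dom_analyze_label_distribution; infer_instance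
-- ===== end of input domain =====

-- B replaces A's comparison sort of the count dict by a counting (bucket) sort over the
-- count values, emitting equal-count labels in first-seen order; objective: alternative algorithm.

-- ===== PORT A =====
def analyze_label_distribution (labels : List String) : List (String × Int) :=
  let label_stats := labels.foldl (fun d label =>
      let d' := if d.contains label then d else d.insert label 0
      d'.insert label (d'.getD label 0 + 1)) PySem.Dict.empty
  (PySem.Dict.ofList (PySem.List.sorted label_stats.items (fun x => x.2) true)).items

-- ===== PORT B =====
def analyze_label_distribution_alt (labels : List String) : List (String × Int) :=
  let counts := labels.foldl (fun d label => d.insert label (d.getD label 0 + 1)) PySem.Dict.empty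
  if counts.items.isEmpty then [] else
    let max_count := (PySem.List.max? counts.values (fun x => x)).getD 0
    let buckets := counts.items.foldl
      (fun (b : PySem.Dict Int (List String)) p => b.modify p.2 [] (fun l => l ++ [p.1]))
      PySem.Dict.empty
    let result := (PySem.List.pyRange max_count 0 (-1)).foldl
      (fun (r : PySem.Dict String Int) c =>
        (buckets.getD c []).foldl (fun r label => r.insert label c) r)
      PySem.Dict.empty
    result.items

-- ===== PRECONDITION & SPEC =====
def Spec_analyze_label_distribution (labels : List String) (out : List (String × Int)) : Prop := out = analyze_label_distribution_alt labels
instance (labels : List String) (out : List (String × Int)) : Decidable (Spec_analyze_label_distribution labels out) := by unfold Spec_analyze_label_distribution; infer_instance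

-- ===== CLAIM (what is proved, stated in full; the proofs are below) =====
def Claim_equal_analyze_label_distribution : Prop := ∀ (labels : List String), Dom_analyze_label_distribution labels → Spec_analyze_label_distribution labels (analyze_label_distribution labels)

-- ===== LEMMAS AND PROOFS =====

-- A's loop (membership test, init to 0, increment) is the standard counting fold.
lemma counterA (labels : List String) :
    labels.foldl (fun d label =>
      let d' := if d.contains label then d else d.insert label 0
      d'.insert label (d'.getD label 0 + 1)) PySem.Dict.empty = PySem.Dict.counter labels := by
  rw [PySem.List.foldl_congr_mem _ _ (fun d x => d.insert x (d.getD x 0 + 1)) _ ?h]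
  · exact PySem.Dict.foldl_insert_getD_add_one_eq_counter labels
  case h =>
    intro d l _
    by_cases h : d.contains l = true
    · simp [h]
    · have h' : d.contains l = false := by simpa using h
      simp only [h', if_neg Bool.false_ne_true]
      rw [PySem.Dict.getD_insert_self, PySem.Dict.insert_insert_self,
        PySem.Dict.getD_of_not_contains _ _ h']

-- dict() of a key-nodup pair list keeps it as the item list.
lemma items_ofList_of_nodup (L : List (String × Int)) (h : (L.map Prod.fst).Nodup) :
    (PySem.Dict.ofList L).items = L := by
  have := PySem.Dict.items_foldl_insert_fresh L Prod.fst Prod.snd PySem.Dict.empty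
    (fun a _ => PySem.Dict.contains_empty _) h
  simpa [PySem.Dict.ofList, PySem.Dict.update] using this

-- the bucket dict maps each count to the labels carrying it, in item order.
lemma buckets_getD (L : List (String × Int)) (c : Int) :
    (L.foldl (fun (b : PySem.Dict Int (List String)) p => b.modify p.2 [] (fun l => l ++ [p.1]))
      PySem.Dict.empty).getD c []
    = (L.filter (fun p => p.2 == c)).map (fun p => p.1) := by
  rw [show (L.foldl (fun (b : PySem.Dict Int (List String)) p => b.modify p.2 [] (fun l => l ++ [p.1])) PySem.Dict.empty)
      = ((L.map Prod.swap).foldl (fun (b : PySem.Dict Int (List String)) q => b.modify q.1 [] (fun l => l ++ [q.2])) PySem.Dict.empty) from by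
    rw [List.foldl_map]; rfl]
  rw [PySem.Dict.getD_foldl_modify_append]
  simp [List.filter_map, List.map_map, Function.comp_def, Prod.swap]

-- insertBy with the reversed comparator drops a new element right after the block of ≥-keys.
lemma insertBy_pos {α : Type} (key : α → Int) (x : α) (P Q : List α)
    (hP : ∀ y ∈ P, ¬ key y < key x) (hQ : ∀ y ∈ Q, key y < key x) :
    PySem.List.insertBy (fun a b => decide (key b < key a)) x (P ++ Q) = P ++ x :: Q := by
  induction P with
  | nil =>
      cases Q with
      | nil => simp [PySem.List.insertBy]
      | cons y ys => simp [PySem.List.insertBy, hQ y (by simp)]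
  | cons y P' ih =>
      have hy : ¬ key y < key x := hP y (by simp)
      simp only [List.cons_append, PySem.List.insertBy, decide_eq_true_eq, if_neg hy]
      exact congrArg (y :: ·) (ih (fun z hz => hP z (by simp [hz])))

-- Python's stable descending sort = concatenation of key buckets over a strictly
-- decreasing enumeration of the possible key values.
lemma stable_desc_sort {α : Type} (key : α → Int) (cs : List Int) (hcs : cs.Pairwise (· > ·)) :
    ∀ L : List α, (∀ p ∈ L, key p ∈ cs) →
      PySem.List.sorted L key true = cs.flatMap (fun c => L.filter (fun p => key p == c)) := by
  intro L
  induction L using List.reverseRecOn with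
  | nil => intro _; simp [PySem.List.sorted]
  | append_singleton L x ih =>
    intro hmem
    have hL : ∀ p ∈ L, key p ∈ cs := fun p hp => hmem p (by simp [hp])
    have hx : key x ∈ cs := hmem x (by simp)
    rw [PySem.List.sorted_rev_eq_foldl_insertBy, List.foldl_append]
    simp only [List.foldl_cons, List.foldl_nil]
    rw [← PySem.List.sorted_rev_eq_foldl_insertBy, ih hL]
    obtain ⟨cs1, cs2, rfl⟩ := List.append_of_mem hx
    have hsplit := List.pairwise_append.mp hcs
    have hgt1 : ∀ c ∈ cs1, c > key x := fun c hc => hsplit.2.2 c hc (key x) (by simp)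
    have hgt2 : ∀ c ∈ cs2, key x > c := (List.pairwise_cons.mp hsplit.2.1).1
    have hbkt : ∀ (c : Int), ∀ y ∈ L.filter (fun p => key p == c), key y = c := by
      intro c y hy
      have := List.of_mem_filter hy
      simpa using this
    rw [List.flatMap_append, List.flatMap_cons]
    rw [show cs1.flatMap (fun c => L.filter (fun p => key p == c)) ++
          (L.filter (fun p => key p == key x) ++
           cs2.flatMap (fun c => L.filter (fun p => key p == c)))
        = (cs1.flatMap (fun c => L.filter (fun p => key p == c)) ++
           L.filter (fun p => key p == key x)) ++
          cs2.flatMap (fun c => L.filter (fun p => key p == c)) by rw [List.append_assoc]]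
    rw [insertBy_pos key x _ _ ?hP ?hQ]
    case hP =>
      intro y hy
      rcases List.mem_append.mp hy with h1 | h2
      · obtain ⟨c, hc, hyc⟩ := List.mem_flatMap.mp h1
        have := hbkt c y hyc
        have := hgt1 c hc
        omega
      · have := hbkt (key x) y h2
        omega
    case hQ =>
      intro y hy
      obtain ⟨c, hc, hyc⟩ := List.mem_flatMap.mp hy
      have := hbkt c y hyc
      have := hgt2 c hc
      omega
    rw [List.flatMap_append, List.flatMap_cons]
    have e1 : cs1.flatMap (fun c => (L ++ [x]).filter (fun p => key p == c))
        = cs1.flatMap (fun c => L.filter (fun p => key p == c)) := by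
      apply List.flatMap_congr
      intro c hc
      rw [List.filter_append]
      have : key x ≠ c := by have := hgt1 c hc; omega
      simp [this]
    have e2 : cs2.flatMap (fun c => (L ++ [x]).filter (fun p => key p == c))
        = cs2.flatMap (fun c => L.filter (fun p => key p == c)) := by
      apply List.flatMap_congr
      intro c hc
      rw [List.filter_append]
      have : key x ≠ c := by have := hgt2 c hc; omega
      simp [this]
    rw [e1, e2, List.filter_append]
    simp

-- range(M, 0, -1) enumerated explicitly.
lemma pyRange_desc (M : Int) (h : 0 ≤ M) :
    PySem.List.pyRange M 0 (-1) = List.map (fun k : Nat => M - (k : Int)) (List.range M.toNat) := by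
  unfold PySem.List.pyRange
  norm_num
  rcases lt_or_ge 0 M with hM | hM
  · rw [if_pos hM]
    apply List.map_congr_left
    intro k hk
    ring
  · have h0 : M = 0 := le_antisymm hM h
    subst h0; norm_num

-- a double insertion fold over pairwise-disjoint fresh buckets appends all its pairs.
lemma items_bucket_fold (bf : Int → List String) (cs : List Int) :
    ∀ d : PySem.Dict String Int,
    (∀ c ∈ cs, ∀ l ∈ bf c, d.contains l = false) →
    (∀ c ∈ cs, (bf c).Nodup) →
    cs.Pairwise (fun c c' => ∀ l ∈ bf c, l ∉ bf c') →
    (cs.foldl (fun r c => (bf c).foldl (fun r l => r.insert l c) r) d).items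
      = d.items ++ cs.flatMap (fun c => (bf c).map (fun l => (l, c))) := by
  induction cs with
  | nil => intro d _ _ _; simp
  | cons c cs ih =>
    intro d hd hnd hdisj
    simp only [List.foldl_cons, List.flatMap_cons]
    have hfresh : ∀ l ∈ bf c, d.contains l = false := hd c (by simp)
    have hitems : ((bf c).foldl (fun r l => r.insert l c) d).items
        = d.items ++ (bf c).map (fun l => (l, c)) := by
      have := PySem.Dict.items_foldl_insert_fresh (bf c) (fun l => l) (fun _ => c) d
        hfresh (by simpa using hnd c (by simp))
      simpa using this
    have hdisj' := List.pairwise_cons.mp hdisj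
    have hcont : ∀ c' ∈ cs, ∀ l ∈ bf c',
        ((bf c).foldl (fun r l => r.insert l c) d).contains l = false := by
      intro c' hc' l hl
      have h1 : l ∉ d.keys := by
        have hdl := hd c' (by simp [hc']) l hl
        intro hmem
        have := (PySem.Dict.contains_iff_mem_keys d l).mpr hmem
        simp_all
      have h2 : l ∉ bf c := fun hmem => hdisj'.1 c' hc' l hmem hl
      have hk : l ∉ ((bf c).foldl (fun r l => r.insert l c) d).keys := by
        simp only [PySem.Dict.keys, hitems, List.map_append, List.map_map, List.mem_append]
        rintro (hA | hB)
        · exact h1 (by simpa [PySem.Dict.keys] using hA)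
        · exact h2 (by simpa using hB)
      rcases Bool.eq_false_or_eq_true (((bf c).foldl (fun r l => r.insert l c) d).contains l) with hb | hb
      · exact absurd ((PySem.Dict.contains_iff_mem_keys _ l).mp hb) hk
      · exact hb
    rw [ih _ hcont (fun c' hc' => hnd c' (by simp [hc'])) hdisj'.2, hitems, List.append_assoc]

-- ===== VERDICT (by name: the statement is the Claim_ definition above) =====
theorem analyze_label_distribution_spec : Claim_equal_analyze_label_distribution := by
  intro labels _
  unfold Spec_analyze_label_distribution
  by_cases hnil : labels = []
  · subst hnil; rfl
  simp only [analyze_label_distribution, analyze_label_distribution_alt, counterA,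
    PySem.Dict.foldl_insert_getD_add_one_eq_counter]
  set L := (PySem.Dict.counter labels).items with hLdef
  have hL : L = (PySem.Set.ofList labels).map (fun k => (k, (labels.count k : Int))) :=
    PySem.Dict.items_counter labels
  have hfstL : L.map Prod.fst = PySem.Set.ofList labels := by
    rw [hL, List.map_map]
    conv_rhs => rw [← List.map_id (PySem.Set.ofList labels)]
    exact List.map_congr_left (fun a _ => rfl)
  have hndS : (PySem.Set.ofList labels).Nodup := PySem.Set.nodup_ofList labels
  have hSne : PySem.Set.ofList labels ≠ [] := by
    obtain ⟨x, hx⟩ := List.exists_mem_of_ne_nil labels hnil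
    intro h
    exact absurd ((PySem.Set.mem_ofList labels x).mpr hx) (by simp [h])
  have hLne : L ≠ [] := by
    rw [hL]; intro h; exact hSne (by simpa using h)
  rw [if_neg (by simpa [List.isEmpty_iff] using hLne)]
  -- the maximum count
  have hvals : (PySem.Dict.counter labels).values = L.map Prod.snd := rfl
  obtain ⟨m, hm⟩ : ∃ m, PySem.List.max? (PySem.Dict.counter labels).values (fun x => x) = some m := by
    cases h : PySem.List.max? (PySem.Dict.counter labels).values (fun x => x) with
    | none =>
        rw [PySem.List.max?_eq_none_iff, hvals] at h
        exact absurd (by simpa using h) hLne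
    | some m => exact ⟨m, rfl⟩
  rw [hm]
  simp only [Option.getD_some]
  -- every count lies in [1, m]
  have hcnt : ∀ p ∈ L, p = (p.1, (labels.count p.1 : Int)) ∧ p.1 ∈ labels := by
    intro p hp
    rw [hL] at hp
    obtain ⟨k, hk, rfl⟩ := List.mem_map.mp hp
    exact ⟨rfl, (PySem.Set.mem_ofList labels k).mp hk⟩
  have hub : ∀ p ∈ L, 1 ≤ p.2 ∧ p.2 ≤ m := by
    intro p hp
    constructor
    · obtain ⟨hpe, hpl⟩ := hcnt p hp
      have : 0 < labels.count p.1 := List.count_pos_iff.mpr hpl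
      rw [hpe]; simpa using this
    · exact PySem.List.max?_isMax hm p.2 (by rw [hvals]; exact List.mem_map_of_mem hp)
  have hmpos : 1 ≤ m := by
    have hmm := PySem.List.max?_mem hm
    rw [hvals] at hmm
    obtain ⟨p, hp, hpm⟩ := List.mem_map.mp hmm
    have := (hub p hp).1
    omega
  -- the descending range of counts
  have hcs_eq := pyRange_desc m (by omega)
  have hpw : (PySem.List.pyRange m 0 (-1)).Pairwise (· > ·) := by
    rw [hcs_eq, List.pairwise_map]
    apply List.Pairwise.imp ?_ List.pairwise_lt_range
    intro a b h
    simp only [gt_iff_lt]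
    omega
  have hmemcs : ∀ p ∈ L, p.2 ∈ PySem.List.pyRange m 0 (-1) := by
    intro p hp
    have := hub p hp
    rw [hcs_eq]
    refine List.mem_map.mpr ⟨(m - p.2).toNat, List.mem_range.mpr ?_, ?_⟩ <;> omega
  -- A's side: dict(sorted(...)) is just the sorted item list, then bucket form
  have hsortnd : ((PySem.List.sorted L (fun x => x.2) true).map Prod.fst).Nodup := by
    have hperm : ((PySem.List.sorted L (fun x => x.2) true).map Prod.fst).Perm (L.map Prod.fst) :=
      (PySem.List.sorted_perm L (fun x => x.2) true).map Prod.fst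
    rw [hperm.nodup_iff, hfstL]
    exact hndS
  rw [items_ofList_of_nodup _ hsortnd]
  rw [stable_desc_sort (fun x => x.2) _ hpw L hmemcs]
  -- B's side
  simp only [buckets_getD]
  rw [items_bucket_fold (fun c => (L.filter (fun p => p.2 == c)).map (fun p => p.1))
      (PySem.List.pyRange m 0 (-1)) PySem.Dict.empty
      (fun _ _ l _ => PySem.Dict.contains_empty l) ?hnd ?hdisj]
  case hnd =>
    intro c _
    exact (((List.filter_sublist (l := L) ..).map (fun p => p.1)).nodup (by rw [hfstL]; exact hndS))
  case hdisj =>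
    apply hpw.imp
    intro c c' hcc l hlc hlc'
    obtain ⟨p, hpf, hpl⟩ := List.mem_map.mp hlc
    obtain ⟨q, hqf, hql⟩ := List.mem_map.mp hlc'
    have hpc : p.2 = c := by simpa using List.of_mem_filter hpf
    have hqc : q.2 = c' := by simpa using List.of_mem_filter hqf
    have hp := (hcnt p (List.mem_of_mem_filter hpf)).1
    have hq := (hcnt q (List.mem_of_mem_filter hqf)).1
    have : p.2 = q.2 := by
      rw [hp] at hpc ⊢
      rw [hq] at hqc ⊢
      simp only at *
      rw [hpl, hql]
    omega
  · rw [show (PySem.Dict.empty : PySem.Dict String Int).items = [] from rfl, List.nil_append]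
    apply List.flatMap_congr
    intro c _
    rw [List.map_map]
    have hfix : ∀ p ∈ L.filter (fun p => p.2 == c), ((fun l => (l, c)) ∘ fun p : String × Int => p.1) p = id p := by
      intro p hp
      have : p.2 = c := by simpa using List.of_mem_filter hp
      simp [Function.comp, Prod.ext_iff, this]
    rw [List.map_congr_left hfix, List.map_id]
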